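-- pv_equiv track=rewrite | github.com/charles-wangkai/hacker.org | challenge/DidacticFeedbackCipherLong.py | decrypt_feedback_cipher_long
-- ===== SOURCE A (Python) =====
-- def decrypt_feedback_cipher_long(cipher, key):
--     s = bytes.fromhex(cipher)
--
--     plain = ''
--     for i in range(0, len(s), 4):
--         part = int.from_bytes(s[i:i + 4], byteorder='big')
--         c = key ^ part
--         plain += ''.join(map(chr, c.to_bytes(4, byteorder='big')))
--         key = part
--     return plain
-- ===== SOURCE B (Python) =====
-- def decrypt_feedback_cipher_long(cipher, key):
--     s = bytes.fromhex(cipher)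
--     r = len(s) % 4
--     t = s[:len(s) - r] + bytes((4 - r) % 4) + s[len(s) - r:]
--     ks = (key.to_bytes(4, 'big') + t)[:len(t)]
--     return ''.join(chr(a ^ b) for a, b in zip(ks, t))
-- ===== Notes on version B (the rewrite author's own statement) =====
-- stated objective: alternative
-- what changed: Replaced A's per-block integer accumulator loop (int.from_bytes / xor / to_bytes on each 4-byte block) with a flat byte-level pass: left-pad the trailing short block with zeros to right-align it, build the one-block-shifted keystream key_bytes+t, and XOR the two byte strings pointwise.
-- outside the precondition, e.g. on decrypt_feedback_cipher_long('  ', -1): A returns '', B raises OverflowError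
import Mathlib
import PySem

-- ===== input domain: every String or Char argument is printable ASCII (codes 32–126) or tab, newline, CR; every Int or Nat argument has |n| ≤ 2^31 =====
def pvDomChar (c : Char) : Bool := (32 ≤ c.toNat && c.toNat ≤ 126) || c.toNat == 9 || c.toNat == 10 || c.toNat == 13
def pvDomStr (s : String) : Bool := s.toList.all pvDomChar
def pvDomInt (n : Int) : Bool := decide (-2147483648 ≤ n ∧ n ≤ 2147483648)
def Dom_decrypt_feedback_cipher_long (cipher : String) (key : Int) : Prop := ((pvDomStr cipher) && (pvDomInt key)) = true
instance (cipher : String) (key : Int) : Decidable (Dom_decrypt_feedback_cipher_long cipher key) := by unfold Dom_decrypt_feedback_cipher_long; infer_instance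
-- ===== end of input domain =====

-- B replaces A's per-block int accumulator loop (int.from_bytes / xor / to_bytes per block)
-- by a single flat byte-level pass: right-align the trailing short block with zero padding,
-- build the keystream key_bytes ++ t shifted by one block, and XOR bytewise; return value only.

-- ===== shared builtin helpers (ports of bytes.fromhex, used by both ports) =====

-- hex digit value, as in bytes.fromhex (case-insensitive)
def hexVal? (c : Char) : Option Nat :=
  if '0' ≤ c ∧ c ≤ '9' then some (c.toNat - 48)
  else if 'a' ≤ c ∧ c ≤ 'f' then some (c.toNat - 87)
  else if 'A' ≤ c ∧ c ≤ 'F' then some (c.toNat - 55)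
  else none

-- ASCII whitespace, skipped by bytes.fromhex between byte pairs
def wsChar (c : Char) : Bool := c == ' ' || c == '\t' || c == '\n' || c == '\x0b' || c == '\x0c' || c == '\r'

-- bytes.fromhex: whitespace allowed between pairs, each byte is two adjacent hex digits; none = ValueError
def pyFromHex? (l : List Char) : Option (List Nat) :=
  match l with
  | [] => some []
  | c :: rest =>
    if wsChar c then pyFromHex? rest
    else
      match hexVal? c, rest with
      | some h, c2 :: rest2 =>
        match hexVal? c2 with
        | some lo => (pyFromHex? rest2).map (fun bs => (h * 16 + lo) :: bs)
        | none => none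
      | _, _ => none
termination_by l.length

-- ===== PORT A =====

-- int.from_bytes(bs, 'big')
def intFromBytesBE (bs : List Nat) : Int := bs.foldl (fun a b => a * 256 + (b : Int)) 0

-- the four characters chr(byte) of c.to_bytes(4, 'big'); exact for 0 ≤ c < 2^32 (guaranteed by Pre_ + Dom_)
def intToBytes4Chars (c : Int) : List Char :=
  [Char.ofNat (PySem.Int.mod (PySem.Int.floordiv c 16777216) 256).toNat,
   Char.ofNat (PySem.Int.mod (PySem.Int.floordiv c 65536) 256).toNat,
   Char.ofNat (PySem.Int.mod (PySem.Int.floordiv c 256) 256).toNat,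
   Char.ofNat (PySem.Int.mod c 256).toNat]

-- A's loop: each iteration consumes s[i:i+4], emits chr-joined (key ^ part) and feeds part forward
def aLoop (s : List Nat) (key : Int) : List Char :=
  if _hs : s = [] then []
  else
    let part := intFromBytesBE (s.take 4)
    intToBytes4Chars (PySem.Int.bxor key part) ++ aLoop (s.drop 4) part
termination_by s.length
decreasing_by
  cases s with
  | nil => exact absurd rfl _hs
  | cons a t => simp only [List.length_drop, List.length_cons]; omega

def decrypt_feedback_cipher_long (cipher : String) (key : Int) : String :=
  String.ofList (aLoop ((pyFromHex? cipher.toList).getD []) key)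

-- ===== PORT B =====

-- the four bytes of key.to_bytes(4, 'big'); exact for 0 ≤ key < 2^32 (guaranteed by Pre_ + Dom_)
def keyBytes4 (k : Int) : List Nat :=
  [(PySem.Int.mod (PySem.Int.floordiv k 16777216) 256).toNat,
   (PySem.Int.mod (PySem.Int.floordiv k 65536) 256).toNat,
   (PySem.Int.mod (PySem.Int.floordiv k 256) 256).toNat,
   (PySem.Int.mod k 256).toNat]

def decrypt_feedback_cipher_long_alt (cipher : String) (key : Int) : String :=
  let s := (pyFromHex? cipher.toList).getD []
  let r := s.length % 4
  let t := s.take (s.length - r) ++ List.replicate ((4 - r) % 4) 0 ++ s.drop (s.length - r)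
  let ks := (keyBytes4 key ++ t).take t.length
  String.ofList (List.zipWith (fun a b => Char.ofNat (a ^^^ b)) ks t)

-- ===== PRECONDITION & SPEC =====

-- Pre_ excludes exactly the inputs on which A raises inside Dom_: invalid hex (ValueError from
-- bytes.fromhex) and negative key (OverflowError from to_bytes on a negative int — when the data
-- is empty A happens to return '' but B's key.to_bytes(4,'big') still raises there, see cites).
-- Valid hex = between whitespace, every run of characters consists of hex digits and has even length.
def Pre_decrypt_feedback_cipher_long (cipher : String) (key : Int) : Prop :=
  (cipher.toList.splitOnP wsChar).all
      (fun seg => decide (seg.length % 2 = 0) && seg.all (fun c => (hexVal? c).isSome)) = true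
  ∧ 0 ≤ key
instance (cipher : String) (key : Int) : Decidable (Pre_decrypt_feedback_cipher_long cipher key) := by
  unfold Pre_decrypt_feedback_cipher_long; infer_instance

def pvWitness_decrypt_feedback_cipher_long : String × Int := ("4142 43ff", 7)

def Spec_decrypt_feedback_cipher_long (cipher : String) (key : Int) (out : String) : Prop := out = decrypt_feedback_cipher_long_alt cipher key
instance (cipher : String) (key : Int) (out : String) : Decidable (Spec_decrypt_feedback_cipher_long cipher key out) := by unfold Spec_decrypt_feedback_cipher_long; infer_instance

-- ===== CLAIM (what is proved, stated in full; the proofs are below) =====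
def Claim_equal_decrypt_feedback_cipher_long : Prop := ∀ (cipher : String) (key : Int), Dom_decrypt_feedback_cipher_long cipher key → Pre_decrypt_feedback_cipher_long cipher key → Spec_decrypt_feedback_cipher_long cipher key (decrypt_feedback_cipher_long cipher key)

-- ===== LEMMAS AND PROOFS =====

-- Nat-level view of to_bytes(4,'big')
def natBytes4 (m : Nat) : List Nat := [m / 16777216 % 256, m / 65536 % 256, m / 256 % 256, m % 256]

theorem keyBytes4_natCast (m : Nat) : keyBytes4 (m : Int) = natBytes4 m := by
  simp only [keyBytes4, natBytes4]
  rw [PySem.Int.floordiv_eq_ediv_of_pos (by norm_num), PySem.Int.floordiv_eq_ediv_of_pos (by norm_num),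
      PySem.Int.floordiv_eq_ediv_of_pos (by norm_num), PySem.Int.mod_eq_emod_of_pos (by norm_num),
      PySem.Int.mod_eq_emod_of_pos (by norm_num), PySem.Int.mod_eq_emod_of_pos (by norm_num),
      PySem.Int.mod_eq_emod_of_pos (by norm_num)]
  simp only [List.cons.injEq, and_true]
  refine ⟨by omega, by omega, by omega, by omega⟩

theorem intToBytes4Chars_eq (c : Int) : intToBytes4Chars c = (keyBytes4 c).map Char.ofNat := rfl

-- per-byte slice of a Nat xor
theorem byteXor (a b k : Nat) : ((a ^^^ b) / 2^k) % 256 = ((a/2^k)%256) ^^^ ((b/2^k)%256) := by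
  rw [show (256:Nat) = 2^8 from rfl]
  apply Nat.eq_of_testBit_eq
  intro i
  simp only [Nat.testBit_mod_two_pow, Nat.testBit_div_two_pow, Nat.testBit_xor, Bool.and_xor_distrib_left]

theorem natBytes4_xor (m n : Nat) :
    natBytes4 (m ^^^ n) = List.zipWith (· ^^^ ·) (natBytes4 m) (natBytes4 n) := by
  have h24 := byteXor m n 24
  have h16 := byteXor m n 16
  have h8 := byteXor m n 8
  have h0 := byteXor m n 0
  norm_num at h24 h16 h8 h0
  simp only [natBytes4, List.zipWith, h24, h16, h8, h0]

theorem keyBytes4_bxor (x y : Int) (hx : 0 ≤ x) (hy : 0 ≤ y) :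
    keyBytes4 (PySem.Int.bxor x y) = List.zipWith (· ^^^ ·) (keyBytes4 x) (keyBytes4 y) := by
  rw [PySem.Int.bxor_of_nonneg hx hy, keyBytes4_natCast, natBytes4_xor,
      ← Int.toNat_of_nonneg hx, ← Int.toNat_of_nonneg hy, keyBytes4_natCast, keyBytes4_natCast]
  simp only [Int.toNat_natCast]

theorem intFromBytesBE_nonneg (bs : List Nat) : 0 ≤ intFromBytesBE bs := by
  have h : ∀ (l : List Nat) (a : Int), 0 ≤ a → 0 ≤ l.foldl (fun a b => a * 256 + (b : Int)) a := by
    intro l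
    induction l with
    | nil => intro a ha; simpa using ha
    | cons x t ih => intro a ha; exact ih _ (by positivity)
  exact h bs 0 le_rfl

-- to_bytes(4) after from_bytes of at most 4 small bytes = left zero padding
theorem keyBytes4_intFromBytesBE (bs : List Nat) (hl : bs.length ≤ 4) (hb : ∀ b ∈ bs, b < 256) :
    keyBytes4 (intFromBytesBE bs) = List.replicate (4 - bs.length) 0 ++ bs := by
  match bs, hl with
  | [], _ => decide
  | [a], _ =>
    have ha := hb a (by simp)
    have h : intFromBytesBE [a] = ((a : Nat) : Int) := by simp [intFromBytesBE]
    rw [h, keyBytes4_natCast]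
    show natBytes4 a = [0, 0, 0, a]
    simp only [natBytes4, List.cons.injEq, and_true]
    omega
  | [a,b], _ =>
    have ha := hb a (by simp); have hb2 := hb b (by simp)
    have h : intFromBytesBE [a,b] = ((a*256+b : Nat) : Int) := by
      simp [intFromBytesBE]
    rw [h, keyBytes4_natCast]
    show natBytes4 (a*256+b) = [0, 0, a, b]
    simp only [natBytes4, List.cons.injEq, and_true]
    omega
  | [a,b,c], _ =>
    have ha := hb a (by simp); have hb2 := hb b (by simp); have hc := hb c (by simp)
    have h : intFromBytesBE [a,b,c] = ((a*65536+b*256+c : Nat) : Int) := by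
      simp [intFromBytesBE]; ring_nf
    rw [h, keyBytes4_natCast]
    show natBytes4 (a*65536+b*256+c) = [0, a, b, c]
    simp only [natBytes4, List.cons.injEq, and_true]
    omega
  | [a,b,c,d], _ =>
    have ha := hb a (by simp); have hb2 := hb b (by simp); have hc := hb c (by simp); have hd := hb d (by simp)
    have h : intFromBytesBE [a,b,c,d] = ((a*16777216+b*65536+c*256+d : Nat) : Int) := by
      simp [intFromBytesBE]; ring_nf
    rw [h, keyBytes4_natCast]
    show natBytes4 (a*16777216+b*65536+c*256+d) = [a, b, c, d]
    simp only [natBytes4, List.cons.injEq, and_true]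
    omega

theorem char_le_toNat {a b : Char} (h : a ≤ b) : a.toNat ≤ b.toNat := by
  rw [Char.le_def] at h
  exact UInt32.le_iff_toNat_le.mp h

theorem hexVal?_lt {c : Char} {h : Nat} (he : hexVal? c = some h) : h < 16 := by
  unfold hexVal? at he
  split_ifs at he with h1 h2 h3 <;> simp only [Option.some.injEq] at he <;> subst he
  · have h9 := char_le_toNat h1.2
    simp only [show ('9':Char).toNat = 57 from rfl] at h9
    omega
  · have h9 := char_le_toNat h2.2
    simp only [show ('f':Char).toNat = 102 from rfl] at h9
    omega
  · have h9 := char_le_toNat h3.2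
    simp only [show ('F':Char).toNat = 70 from rfl] at h9
    omega

theorem fromHex_lt_some (l : List Char) (bs : List Nat) (h : pyFromHex? l = some bs) : ∀ b ∈ bs, b < 256 := by
  fun_induction pyFromHex? l generalizing bs with
  | case1 =>
    simp only [Option.some.injEq] at h; subst h; simp
  | case2 c rest hws ih => exact ih bs h
  | case3 c hws hv1 c2 rest2 he1 lo he2 ih =>
    simp only [Option.map_eq_some_iff] at h
    obtain ⟨bs', hbs', rfl⟩ := h
    intro b hb
    rcases List.mem_cons.mp hb with rfl | hmem
    · have l1 := hexVal?_lt he1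
      have l2 := hexVal?_lt he2
      omega
    · exact ih bs' hbs' b hmem
  | case4 => simp at h
  | case5 => simp at h

theorem fromHex_lt (l : List Char) : ∀ b ∈ (pyFromHex? l).getD [], b < 256 := by
  cases h : pyFromHex? l with
  | none => simp
  | some bs => simpa using fromHex_lt_some l bs h

-- B's padded block stream
def padB (s : List Nat) : List Nat :=
  s.take (s.length - s.length % 4) ++ List.replicate ((4 - s.length % 4) % 4) 0 ++ s.drop (s.length - s.length % 4)

theorem padB_nil : padB [] = [] := rfl

theorem padB_short (s : List Nat) (h1 : s ≠ []) (h4 : s.length < 4) :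
    padB s = List.replicate (4 - s.length) 0 ++ s := by
  have hpos : 0 < s.length := List.length_pos_iff.mpr h1
  unfold padB
  rw [Nat.mod_eq_of_lt h4, Nat.sub_self, List.take_zero, List.drop_zero, List.nil_append,
      Nat.mod_eq_of_lt (by omega)]

theorem padB_step (u v : List Nat) (hu : u.length = 4) : padB (u ++ v) = u ++ padB v := by
  unfold padB
  have hr : (u ++ v).length % 4 = v.length % 4 := by
    rw [List.length_append, hu, Nat.add_mod_left]
  have hle : v.length % 4 ≤ v.length := Nat.mod_le _ _
  have h1 : (u ++ v).length - v.length % 4 = u.length + (v.length - v.length % 4) := by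
    rw [List.length_append, hu]; omega
  rw [hr, h1, List.take_length_add_append, List.drop_length_add_append]
  simp [List.append_assoc]

-- the core byte-level characterisation of one loop step's output
theorem step_bytes (key : Int) (bs : List Nat) (hk : 0 ≤ key) (hl : bs.length ≤ 4) (hb : ∀ b ∈ bs, b < 256) :
    intToBytes4Chars (PySem.Int.bxor key (intFromBytesBE bs)) =
      List.zipWith (fun a b => Char.ofNat (a ^^^ b)) (keyBytes4 key) (List.replicate (4 - bs.length) 0 ++ bs) := by
  rw [intToBytes4Chars_eq, keyBytes4_bxor key _ hk (intFromBytesBE_nonneg bs),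
      keyBytes4_intFromBytesBE bs hl hb, List.map_zipWith]

theorem main_eq (n : Nat) : ∀ (s : List Nat) (key : Int), s.length = n → (∀ b ∈ s, b < 256) → 0 ≤ key →
    aLoop s key =
      List.zipWith (fun a b => Char.ofNat (a ^^^ b)) ((keyBytes4 key ++ padB s).take (padB s).length) (padB s) := by
  induction n using Nat.strong_induction_on with
  | _ n ih =>
    intro s key hlen hb hk
    by_cases hs : s = []
    · subst hs; rw [aLoop]; simp [padB_nil]
    · rw [aLoop, dif_neg hs]
      show intToBytes4Chars (PySem.Int.bxor key (intFromBytesBE (s.take 4))) ++ aLoop (s.drop 4) (intFromBytesBE (s.take 4))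
            = List.zipWith (fun a b => Char.ofNat (a ^^^ b)) ((keyBytes4 key ++ padB s).take (padB s).length) (padB s)
      by_cases hlt : s.length < 4
      · -- final (possibly short) block
        have ht4 : s.take 4 = s := List.take_of_length_le (by omega)
        have hd4 : s.drop 4 = [] := List.drop_eq_nil_of_le (by omega)
        have htail : aLoop [] (intFromBytesBE (s.take 4)) = [] := by rw [aLoop]; simp
        rw [hd4, htail, List.append_nil, ht4, padB_short s hs hlt]
        have hlen4 : (List.replicate (4 - s.length) 0 ++ s).length = 4 := by
          simp only [List.length_append, List.length_replicate]; omega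
        rw [hlen4, List.take_left' (by rfl)]
        exact step_bytes key s hk (by omega) hb
      · -- a full leading block, recurse on the rest
        have hsplit : s = s.take 4 ++ s.drop 4 := (List.take_append_drop 4 s).symm
        have hu : (s.take 4).length = 4 := by simp [List.length_take]; omega
        have hbu : ∀ b ∈ s.take 4, b < 256 := fun b hbm => hb b (List.take_subset 4 s hbm)
        have hbv : ∀ b ∈ s.drop 4, b < 256 := fun b hbm => hb b (List.drop_subset 4 s hbm)
        have hpart : 0 ≤ intFromBytesBE (s.take 4) := intFromBytesBE_nonneg _
        have hkb : keyBytes4 (intFromBytesBE (s.take 4)) = s.take 4 := by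
          have := keyBytes4_intFromBytesBE (s.take 4) (by omega) hbu
          rwa [hu, Nat.sub_self, List.replicate_zero, List.nil_append] at this
        have hrec := ih (s.drop 4).length (by simp [List.length_drop]; omega) (s.drop 4)
          (intFromBytesBE (s.take 4)) rfl hbv hpart
        conv_rhs => rw [hsplit]
        rw [padB_step _ _ hu]
        have htake : (keyBytes4 key ++ (s.take 4 ++ padB (s.drop 4))).take (s.take 4 ++ padB (s.drop 4)).length
            = keyBytes4 key ++ ((s.take 4 ++ padB (s.drop 4)).take (padB (s.drop 4)).length) := by
          have h4' : (s.take 4 ++ padB (s.drop 4)).length = (keyBytes4 key).length + (padB (s.drop 4)).length := by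
            simp only [List.length_append, hu]; rfl
          rw [h4', List.take_length_add_append]
        rw [htake]
        have hzip := List.zipWith_append (f := fun a b => Char.ofNat (a ^^^ b))
          (l₁ := keyBytes4 key) (l₁' := (s.take 4 ++ padB (s.drop 4)).take (padB (s.drop 4)).length)
          (l₂ := s.take 4) (l₂' := padB (s.drop 4))
          (show (keyBytes4 key).length = (s.take 4).length by rw [hu]; rfl)
        rw [hzip]
        congr 1
        · have := step_bytes key (s.take 4) hk (by omega) hbu
          rwa [hu, Nat.sub_self, List.replicate_zero, List.nil_append] at this
        · rw [hkb] at hrec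
          exact hrec

-- ===== VERDICT (by name: the statement is the Claim_ definition above) =====
theorem decrypt_feedback_cipher_long_spec : Claim_equal_decrypt_feedback_cipher_long := by
  intro cipher key _ hpre
  unfold Spec_decrypt_feedback_cipher_long decrypt_feedback_cipher_long decrypt_feedback_cipher_long_alt
  rw [main_eq ((pyFromHex? cipher.toList).getD []).length _ key rfl (fromHex_lt _) hpre.2]
  rfl
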